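-- pv_equiv track=rewrite | github.com/THANForeigner/HCMUS_CSC14003_Project_2 | src/algorithm/comparing_algorithms/dancing_links/dlx_futoshiki.py | build_adj_constraints
-- ===== SOURCE A (Python) =====
-- def build_adj_constraints(size, constraint):
--     h_constraints = constraint[0]
--     v_constraints = constraint[1]
--     lt_pairs = []
--     for r in range(size):
--         for c in range(size - 1):
--             val = h_constraints[r][c]
--             if val == 1:
--                 # Trái < Phải
--                 lt_pairs.append((r, c, r, c + 1))
--             elif val == -1:
--                 # Trái > Phải  =>  Phải < Trái
--                 lt_pairs.append((r, c + 1, r, c))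
--     for r in range(size - 1):
--         for c in range(size):
--             val = v_constraints[r][c]
--             if val == 1:
--                 # Trên < Dưới
--                 lt_pairs.append((r, c, r + 1, c))
--             elif val == -1:
--                 # Trên > Dưới  =>  Dưới < Trên
--                 lt_pairs.append((r + 1, c, r, c))
--     adj_constraints = {}
--     for r1, c1, r2, c2 in lt_pairs:
--         adj_constraints.setdefault((r1, c1), []).append((r2, c2, 1))
--         adj_constraints.setdefault((r2, c2), []).append((r1, c1, -1))
--
--     return adj_constraints
-- ===== SOURCE B (Python) =====
-- def build_adj_constraints(size, constraint):
--     # One parametrized scan over both grids yields the ordered edge list;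
--     # the result is then computed by grouping-by-filtration over deduped keys,
--     # with no mutable dict accumulation at all.
--     edges = [
--         ((r, c), (r + dr, c + dc)) if grid[r][c] == 1 else ((r + dr, c + dc), (r, c))
--         for grid, rows, cols, dr, dc in (
--             (constraint[0], size, size - 1, 0, 1),
--             (constraint[1], size - 1, size, 1, 0),
--         )
--         for r in range(rows)
--         for c in range(cols)
--         if grid[r][c] in (1, -1)
--     ]
--     events = [e for a, b in edges
--                 for e in ((a, (b[0], b[1], 1)), (b, (a[0], a[1], -1)))]
--     keys = list(dict.fromkeys(k for k, _ in events))
--     return {k: [x for kk, x in events if kk == k] for k in keys}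
-- ===== Notes on version B (the rewrite author's own statement) =====
-- stated objective: alternative
-- what changed: Replaces A's two copied grid loops and mutable setdefault/append dict with a single parametrized scan over a list of (grid,rows,cols,dr,dc) specs producing an edge list, and builds the result purely by grouping-by-filtration: dedup the ordered key sequence and compute each key's list as a filter over the event list (no dict mutation).
import Mathlib
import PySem

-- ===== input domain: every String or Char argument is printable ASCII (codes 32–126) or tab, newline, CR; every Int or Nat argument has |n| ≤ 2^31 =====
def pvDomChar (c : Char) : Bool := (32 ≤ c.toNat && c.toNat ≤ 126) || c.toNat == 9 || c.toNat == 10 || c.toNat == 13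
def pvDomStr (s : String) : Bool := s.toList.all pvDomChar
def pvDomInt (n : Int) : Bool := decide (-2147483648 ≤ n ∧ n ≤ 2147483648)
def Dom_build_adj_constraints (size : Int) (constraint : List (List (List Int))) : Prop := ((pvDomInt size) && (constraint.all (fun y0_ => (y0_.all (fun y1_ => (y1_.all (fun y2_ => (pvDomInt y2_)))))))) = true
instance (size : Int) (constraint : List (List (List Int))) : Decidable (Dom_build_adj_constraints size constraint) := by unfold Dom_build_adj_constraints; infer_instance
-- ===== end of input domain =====

-- B replaces A's two copied grid loops and mutable setdefault/append dict with one
-- parametrized scan over (grid,rows,cols,dr,dc) specs producing an edge list, and builds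
-- the result purely by grouping-by-filtration over the deduped key sequence (objective:
-- alternative). B mutates no arguments; equivalence is about the return value.

-- ===== PORT A =====
def build_adj_constraints (size : Int) (constraint : List (List (List Int))) : List (Int × Int × List (Int × Int × Int)) :=
  let h_constraints := PySem.List.pyGetD constraint 0 []
  let v_constraints := PySem.List.pyGetD constraint 1 []
  let lt_pairs : List (Int × Int × Int × Int) :=
    (PySem.List.pyRange 0 size 1).foldl (fun acc r =>
      (PySem.List.pyRange 0 (size - 1) 1).foldl (fun acc c =>
        let val := PySem.List.pyGetD (PySem.List.pyGetD h_constraints r []) c 0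
        if val = 1 then acc ++ [(r, c, r, c + 1)]
        else if val = -1 then acc ++ [(r, c + 1, r, c)]
        else acc) acc) []
  let lt_pairs :=
    (PySem.List.pyRange 0 (size - 1) 1).foldl (fun acc r =>
      (PySem.List.pyRange 0 size 1).foldl (fun acc c =>
        let val := PySem.List.pyGetD (PySem.List.pyGetD v_constraints r []) c 0
        if val = 1 then acc ++ [(r, c, r + 1, c)]
        else if val = -1 then acc ++ [(r + 1, c, r, c)]
        else acc) acc) lt_pairs
  let adj_constraints : PySem.Dict (Int × Int) (List (Int × Int × Int)) :=
    lt_pairs.foldl (fun d q =>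
      -- q = (r1, c1, r2, c2); setdefault(k, []).append(x) is modify k [] (· ++ [x])
      let d := d.modify (q.1, q.2.1) [] (· ++ [(q.2.2.1, q.2.2.2, 1)])
      d.modify (q.2.2.1, q.2.2.2) [] (· ++ [(q.1, q.2.1, -1)])) PySem.Dict.empty
  adj_constraints.items.map (fun p => (p.1.1, p.1.2, p.2))

-- ===== PORT B =====
-- the body of B's edge comprehension for one cell: the 'if … in (1, -1)' filter plus the
-- conditional-expression edge
def pvCellEdge (grid : List (List Int)) (dr dc r c : Int) : List ((Int × Int) × (Int × Int)) :=
  let val := PySem.List.pyGetD (PySem.List.pyGetD grid r []) c 0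
  if val = 1 ∨ val = -1 then
    [if val = 1 then ((r, c), (r + dr, c + dc)) else ((r + dr, c + dc), (r, c))]
  else []

def build_adj_constraints_alt (size : Int) (constraint : List (List (List Int))) : List (Int × Int × List (Int × Int × Int)) :=
  let specs : List (List (List Int) × Int × Int × Int × Int) :=
    [(PySem.List.pyGetD constraint 0 [], size, size - 1, 0, 1),
     (PySem.List.pyGetD constraint 1 [], size - 1, size, 1, 0)]
  let edges := specs.flatMap (fun s =>
    (PySem.List.pyRange 0 s.2.1 1).flatMap (fun r =>
      (PySem.List.pyRange 0 s.2.2.1 1).flatMap (fun c =>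
        pvCellEdge s.1 s.2.2.2.1 s.2.2.2.2 r c)))
  let events : List ((Int × Int) × (Int × Int × Int)) :=
    edges.flatMap (fun e => [(e.1, (e.2.1, e.2.2, 1)), (e.2, (e.1.1, e.1.2, -1))])
  let keys := PySem.List.dedup (events.map (·.1))
  keys.map (fun k => (k.1, k.2, (events.filter (fun e => e.1 == k)).map (·.2)))

-- ===== PRECONDITION & SPEC =====
-- Pre_ excludes exactly the inputs where A raises IndexError: constraint needs two grids,
-- the h-grid needs size rows of length ≥ size-1, the v-grid size-1 rows of length ≥ size.
def Pre_build_adj_constraints (size : Int) (constraint : List (List (List Int))) : Prop :=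
  2 ≤ constraint.length ∧
  (2 ≤ size → size.toNat ≤ (constraint.getD 0 []).length ∧
    ∀ row ∈ (constraint.getD 0 []).take size.toNat, (size - 1).toNat ≤ row.length) ∧
  (1 ≤ size → (size - 1).toNat ≤ (constraint.getD 1 []).length ∧
    ∀ row ∈ (constraint.getD 1 []).take (size - 1).toNat, size.toNat ≤ row.length)
instance (size : Int) (constraint : List (List (List Int))) : Decidable (Pre_build_adj_constraints size constraint) := by unfold Pre_build_adj_constraints; infer_instance

def pvWitness_build_adj_constraints : Int × List (List (List Int)) :=
  (2, [[[1], [0]], [[-1, 0]]])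

def Spec_build_adj_constraints (size : Int) (constraint : List (List (List Int))) (out : List (Int × Int × List (Int × Int × Int))) : Prop := out = build_adj_constraints_alt size constraint
instance (size : Int) (constraint : List (List (List Int))) (out : List (Int × Int × List (Int × Int × Int))) : Decidable (Spec_build_adj_constraints size constraint out) := by unfold Spec_build_adj_constraints; infer_instance

-- ===== CLAIM (what is proved, stated in full; the proofs are below) =====
def Claim_equal_build_adj_constraints : Prop := ∀ (size : Int) (constraint : List (List (List Int))), Dom_build_adj_constraints size constraint → Pre_build_adj_constraints size constraint → Spec_build_adj_constraints size constraint (build_adj_constraints size constraint)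

-- ===== LEMMAS AND PROOFS =====

-- canonical edge lists per cell, quadruple form (A's representation)
def pvEH (h : List (List Int)) (r c : Int) : List (Int × Int × Int × Int) :=
  let val := PySem.List.pyGetD (PySem.List.pyGetD h r []) c 0
  if val = 1 then [(r, c, r, c + 1)]
  else if val = -1 then [(r, c + 1, r, c)]
  else []

def pvEV (v : List (List Int)) (r c : Int) : List (Int × Int × Int × Int) :=
  let val := PySem.List.pyGetD (PySem.List.pyGetD v r []) c 0
  if val = 1 then [(r, c, r + 1, c)]
  else if val = -1 then [(r + 1, c, r, c)]
  else []

-- A's dict-loop body as a function of a quadruple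
def pvStep (d : PySem.Dict (Int × Int) (List (Int × Int × Int)))
    (q : Int × Int × Int × Int) : PySem.Dict (Int × Int) (List (Int × Int × Int)) :=
  let d := d.modify (q.1, q.2.1) [] (· ++ [(q.2.2.1, q.2.2.2, 1)])
  d.modify (q.2.2.1, q.2.2.2) [] (· ++ [(q.1, q.2.1, -1)])

-- the two directed events a quadruple contributes
def pvEvents (q : Int × Int × Int × Int) : List ((Int × Int) × (Int × Int × Int)) :=
  [((q.1, q.2.1), (q.2.2.1, q.2.2.2, 1)), ((q.2.2.1, q.2.2.2), (q.1, q.2.1, -1))]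

-- folding A's two-modify step over quadruples = folding single modifies over the events
theorem pvStep_eq_events (L : List (Int × Int × Int × Int)) :
    ∀ (d : PySem.Dict (Int × Int) (List (Int × Int × Int))),
    L.foldl pvStep d
      = (L.flatMap pvEvents).foldl (fun d p => d.modify p.1 [] (· ++ [p.2])) d := by
  induction L with
  | nil => intro d; rfl
  | cons q L ih =>
    intro d
    simp only [List.foldl_cons, List.flatMap_cons, List.foldl_append, ih]
    rfl

-- grouping lemma: A's modify-append fold, read back as items, IS B's dedup-and-filter
theorem pvGrouping (E : List ((Int × Int) × (Int × Int × Int))) :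
    (E.foldl (fun d p => d.modify p.1 [] (· ++ [p.2]))
      (PySem.Dict.empty : PySem.Dict (Int × Int) (List (Int × Int × Int)))).items
    = (PySem.List.dedup (E.map (·.1))).map
        (fun k => (k, (E.filter (fun e => e.1 == k)).map (·.2))) := by
  have hnd : (E.foldl (fun d p => d.modify p.1 [] (· ++ [p.2]))
      (PySem.Dict.empty : PySem.Dict (Int × Int) (List (Int × Int × Int)))).keys.Nodup := by
    exact PySem.Dict.nodup_keys_foldl_modify_key E (·.1) [] (fun _ p => (· ++ [p.2])) _
      (by simp [PySem.Dict.keys_empty])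
  rw [PySem.Dict.items_eq_map_keys _ hnd []]
  rw [PySem.Dict.keys_foldl_modify_key E (·.1) [] (fun _ p => (· ++ [p.2]))]
  simp only [PySem.Dict.keys_empty, PySem.Set.update_nil_left, PySem.List.dedup_eq_ofList]
  apply List.map_congr_left
  intro k _
  rw [PySem.Dict.getD_foldl_modify_append, PySem.Dict.getD_empty, List.nil_append]

-- per-cell: A's quadruple expanded to events = B's pair expanded to events
theorem pvCellH (h : List (List Int)) (r c : Int) :
    (pvEH h r c).flatMap pvEvents
    = (pvCellEdge h 0 1 r c).flatMap
        (fun e => [(e.1, (e.2.1, e.2.2, (1 : Int))), (e.2, (e.1.1, e.1.2, (-1 : Int)))]) := by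
  simp only [pvEH, pvCellEdge]
  split_ifs <;> simp_all [pvEvents]

theorem pvCellV (v : List (List Int)) (r c : Int) :
    (pvEV v r c).flatMap pvEvents
    = (pvCellEdge v 1 0 r c).flatMap
        (fun e => [(e.1, (e.2.1, e.2.2, (1 : Int))), (e.2, (e.1.1, e.1.2, (-1 : Int)))]) := by
  simp only [pvEV, pvCellEdge]
  split_ifs <;> simp_all [pvEvents]

theorem build_adj_constraints_spec' (size : Int) (constraint : List (List (List Int))) :
    build_adj_constraints size constraint = build_adj_constraints_alt size constraint := by
  unfold build_adj_constraints build_adj_constraints_alt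
  set h := PySem.List.pyGetD constraint 0 [] with hh
  set v := PySem.List.pyGetD constraint 1 [] with hv
  -- A's collection loops, as flatMaps of pvEH / pvEV
  have hA1 : ∀ (acc : List (Int × Int × Int × Int)),
      (PySem.List.pyRange 0 size 1).foldl (fun acc r =>
        (PySem.List.pyRange 0 (size - 1) 1).foldl (fun acc c =>
          let val := PySem.List.pyGetD (PySem.List.pyGetD h r []) c 0
          if val = 1 then acc ++ [(r, c, r, c + 1)]
          else if val = -1 then acc ++ [(r, c + 1, r, c)]
          else acc) acc) acc
      = acc ++ (PySem.List.pyRange 0 size 1).flatMap (fun r =>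
          (PySem.List.pyRange 0 (size - 1) 1).flatMap (fun c => pvEH h r c)) := by
    intro acc
    rw [PySem.List.foldl_congr_mem (g := fun acc r =>
        acc ++ (PySem.List.pyRange 0 (size - 1) 1).flatMap (fun c => pvEH h r c))]
    · exact PySem.List.foldl_append_eq_flatMap _ _ _
    · intro a r _
      rw [PySem.List.foldl_congr_mem (g := fun acc c => acc ++ pvEH h r c)]
      · exact PySem.List.foldl_append_eq_flatMap _ _ _
      · intro a c _
        simp only [pvEH]
        split_ifs <;> simp
  have hA2 : ∀ (acc : List (Int × Int × Int × Int)),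
      (PySem.List.pyRange 0 (size - 1) 1).foldl (fun acc r =>
        (PySem.List.pyRange 0 size 1).foldl (fun acc c =>
          let val := PySem.List.pyGetD (PySem.List.pyGetD v r []) c 0
          if val = 1 then acc ++ [(r, c, r + 1, c)]
          else if val = -1 then acc ++ [(r + 1, c, r, c)]
          else acc) acc) acc
      = acc ++ (PySem.List.pyRange 0 (size - 1) 1).flatMap (fun r =>
          (PySem.List.pyRange 0 size 1).flatMap (fun c => pvEV v r c)) := by
    intro acc
    rw [PySem.List.foldl_congr_mem (g := fun acc r =>
        acc ++ (PySem.List.pyRange 0 size 1).flatMap (fun c => pvEV v r c))]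
    · exact PySem.List.foldl_append_eq_flatMap _ _ _
    · intro a r _
      rw [PySem.List.foldl_congr_mem (g := fun acc c => acc ++ pvEV v r c)]
      · exact PySem.List.foldl_append_eq_flatMap _ _ _
      · intro a c _
        simp only [pvEV]
        split_ifs <;> simp
  simp only [hA1, hA2, List.nil_append]
  rw [show (fun (d : PySem.Dict (Int × Int) (List (Int × Int × Int))) (q : Int × Int × Int × Int) =>
        (d.modify (q.1, q.2.1) [] (· ++ [(q.2.2.1, q.2.2.2, 1)])).modify (q.2.2.1, q.2.2.2) [] (· ++ [(q.1, q.2.1, -1)]))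
      = pvStep from rfl]
  rw [pvStep_eq_events, pvGrouping]
  -- the event lists of the two programs coincide cell by cell
  have hev : ((PySem.List.pyRange 0 size 1).flatMap (fun r =>
        (PySem.List.pyRange 0 (size - 1) 1).flatMap (fun c => pvEH h r c)) ++
      (PySem.List.pyRange 0 (size - 1) 1).flatMap (fun r =>
        (PySem.List.pyRange 0 size 1).flatMap (fun c => pvEV v r c))).flatMap pvEvents
      = ([(h, size, size - 1, (0 : Int), (1 : Int)), (v, size - 1, size, 1, 0)].flatMap (fun s =>
          (PySem.List.pyRange 0 s.2.1 1).flatMap (fun r =>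
            (PySem.List.pyRange 0 s.2.2.1 1).flatMap (fun c =>
              pvCellEdge s.1 s.2.2.2.1 s.2.2.2.2 r c)))).flatMap
          (fun e => [(e.1, (e.2.1, e.2.2, 1)), (e.2, (e.1.1, e.1.2, -1))]) := by
    simp only [List.flatMap_cons, List.flatMap_nil, List.append_nil, List.flatMap_append,
      List.flatMap_assoc]
    congr 1
    · apply List.flatMap_congr  -- h pass
      intro r _
      apply List.flatMap_congr
      intro c _
      exact pvCellH h r c
    · apply List.flatMap_congr  -- v pass
      intro r _
      apply List.flatMap_congr
      intro c _
      exact pvCellV v r c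
  rw [hev]
  simp only [List.map_map]
  rfl

-- ===== VERDICT (by name: the statement is the Claim_ definition above) =====
theorem build_adj_constraints_spec : Claim_equal_build_adj_constraints := by
  intro size constraint _ _
  exact build_adj_constraints_spec' size constraint
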